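-- pv_equiv track=rewrite | github.com/Sarlota-Duskova/Advent-of-Code | 2025/Day2/day2.py | find_invalid_ids_part2
-- ===== SOURCE A (Python) =====
-- def is_repeated_block(s: str) -> bool:
--         """
--         Returns True if the string is composed of a block repeated at least twice.
--         Example: '1212', '123123', '111111', '12341234'.
--         """
--
--         length = len(s)
--
--         if length < 2:
--             return False
--
--         for block_size in range(1, length // 2 + 1): # 2 // 2 = 1 -> 1 + 1 = 2
--             if length % block_size == 0 and s == s[:block_size] * (length // block_size):
--                 # Example: 11
--                 # length % block_size -> 2 % 1 = 0 -> 0 == 0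
--                 # s[:block_size] -> s[:1] = "1"
--                 # (length // block_size) = 2 // 1 = 2
--                 # s[:block_size] * (length // block_size) -> "1" * 2 = "11"
--                 return True
--         return False
--
-- def find_invalid_ids_part2(id_ranges: list[str]) -> dict[str, list[int]]:
--         """
--         Part 2
--         Invalid IDs are any number formed by repeating a block at least twice.
--         """
--
--         invalid_by_range = {}
--
--         for id_range in id_ranges:
--             if '-' not in id_range:
--                 continue
--
--             start_str, end_str = id_range.split('-', 1)
--
--             if (len(start_str) > 1 and start_str.startswith('0')) or (len(end_str) > 1 and end_str.startswith('0')):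
--                 continue
--
--             try:
--                 start = int(start_str)
--                 end = int(end_str)
--             except ValueError:
--                 continue
--
--             if start > end:
--                 continue
--
--             invalids_ids = []
--
--             for num in range(start, end + 1):
--                 s = str(num)
--                 if len(s) > 1 and s.startswith('0'):
--                     continue
--                 if is_repeated_block(s):
--                     invalids_ids.append(num)
--
--             invalid_by_range[id_range] = invalids_ids
--
--         return invalid_by_range
-- ===== SOURCE B (Python) =====
-- def find_invalid_ids_part2(id_ranges: list[str]) -> dict[str, list[int]]:
--     """
--     Part 2 — instead of scanning every number in the range and string-testing it,
--     enumerate the repeated-block numbers directly (block length x repetition count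
--     per total digit length), keep those inside the range, and sort them.
--     """
--     invalid_by_range = {}
--
--     for id_range in id_ranges:
--         if '-' not in id_range:
--             continue
--
--         start_str, end_str = id_range.split('-', 1)
--
--         if (len(start_str) > 1 and start_str.startswith('0')) or (len(end_str) > 1 and end_str.startswith('0')):
--             continue
--
--         try:
--             start = int(start_str)
--             end = int(end_str)
--         except ValueError:
--             continue
--
--         if start > end:
--             continue
--
--         found = set()
--         digits = len(str(end))
--         for total in range(2, digits + 1):
--             for block_len in range(1, total // 2 + 1):
--                 if total % block_len != 0:
--                     continue
--                 reps = total // block_len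
--                 for block in range(10 ** (block_len - 1), 10 ** block_len):
--                     num = 0
--                     for _ in range(reps):
--                         num = num * 10 ** block_len + block
--                     if start <= num <= end:
--                         found.add(num)
--
--         invalid_by_range[id_range] = sorted(found)
--
--     return invalid_by_range
-- ===== Notes on version B (the rewrite author's own statement) =====
-- stated objective: alternative
-- what changed: Instead of scanning every number in the range and string-testing each for a repeated block, B enumerates the repeated-block numbers directly (block length x repetition count per total digit length), keeps those inside the range, and returns them sorted.
import Mathlib
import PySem

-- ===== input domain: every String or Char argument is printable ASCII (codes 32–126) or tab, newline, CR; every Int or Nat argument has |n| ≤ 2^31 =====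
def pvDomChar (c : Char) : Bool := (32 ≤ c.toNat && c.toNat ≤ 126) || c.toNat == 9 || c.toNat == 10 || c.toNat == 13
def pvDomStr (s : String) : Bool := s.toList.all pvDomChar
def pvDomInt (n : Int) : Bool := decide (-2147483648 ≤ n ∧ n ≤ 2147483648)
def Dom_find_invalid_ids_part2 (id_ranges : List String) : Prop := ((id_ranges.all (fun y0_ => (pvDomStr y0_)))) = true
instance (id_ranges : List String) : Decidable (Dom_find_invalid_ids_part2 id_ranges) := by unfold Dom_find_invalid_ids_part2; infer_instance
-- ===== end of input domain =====

-- B replaces A's per-number scan of the whole range by direct enumeration of the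
-- repeated-block numbers (block length × repetition count per digit length): a
-- different algorithm whose work does not grow with the size of the range.

-- ===== PORT A =====

-- Python's  s * n  on a string: n concatenated copies, n ≤ 0 gives '' (exact: toNat sends nonpositive to 0)
def pvStrMul (cs : List Char) (n : Int) : List Char := (List.replicate n.toNat cs).flatten

def is_repeated_block (s : List Char) : Bool :=
  let length : Int := s.length
  if length < 2 then false
  else
    -- the Python for-loop returns True on the first matching block size: that is List.any
    (PySem.List.pyRange 1 (PySem.Int.floordiv length 2 + 1) 1).any fun block_size =>
      (PySem.Int.mod length block_size == 0) &&
      (s == pvStrMul (PySem.List.slice s none (some block_size)) (PySem.Int.floordiv length block_size))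

-- the inner `for num in range(start, end + 1)` loop of A building invalids_ids
def pvInvalidsA (start stop : Int) : List Int :=
  (PySem.List.pyRange start (stop + 1) 1).foldl (fun acc num =>
    let s := PySem.Int.toChars num
    if (s.length : Int) > 1 ∧ PySem.Chars.startswith s ['0'] = true then acc
    else if is_repeated_block s then acc ++ [num] else acc) []

-- one iteration of A's loop over id_ranges
def pvStepA (d : PySem.Dict String (List Int)) (id_range : String) : PySem.Dict String (List Int) :=
  if PySem.Str.isIn "-" id_range = false then d
  else
    match PySem.Str.splitMax? id_range "-" 1 with
    | some [start_str, end_str] =>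
      if (PySem.Str.len start_str > 1 ∧ PySem.Str.startswith start_str "0" = true) ∨
         (PySem.Str.len end_str > 1 ∧ PySem.Str.startswith end_str "0" = true) then d
      else
        match PySem.Int.ofStr? start_str with
        | none => d                      -- ValueError: continue
        | some start =>
          match PySem.Int.ofStr? end_str with
          | none => d                    -- ValueError: continue
          | some stop =>
            if start > stop then d
            else d.insert id_range (pvInvalidsA start stop)
    | _ => d  -- unreachable: '-' present gives exactly two parts

def find_invalid_ids_part2 (id_ranges : List String) : List (String × List Int) :=
  (id_ranges.foldl pvStepA PySem.Dict.empty).items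

-- ===== PORT B =====

-- the block-enumeration replacing A's scan: B's loops over total length / block length / block
def pvInvalidsB (start stop : Int) : List Int :=
  let digits : Int := (PySem.Int.toChars stop).length
  let found : PySem.Set Int :=
    (PySem.List.pyRange 2 (digits + 1) 1).foldl (fun fnd total =>
      (PySem.List.pyRange 1 (PySem.Int.floordiv total 2 + 1) 1).foldl (fun fnd block_len =>
        if PySem.Int.mod total block_len ≠ 0 then fnd
        else
          let reps := PySem.Int.floordiv total block_len
          (PySem.List.pyRange ((10:Int) ^ (block_len - 1).toNat) ((10:Int) ^ block_len.toNat) 1).foldl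
            (fun fnd block =>
              let num := (List.range reps.toNat).foldl
                (fun num _ => num * (10:Int) ^ block_len.toNat + block) 0
              if start ≤ num ∧ num ≤ stop then fnd.add num else fnd) fnd) fnd)
      PySem.Set.empty
  PySem.List.sorted found (fun x => x)

-- one iteration of B's loop over id_ranges (the parsing lines are the same Python lines as A's)
def pvStepB (d : PySem.Dict String (List Int)) (id_range : String) : PySem.Dict String (List Int) :=
  if PySem.Str.isIn "-" id_range = false then d
  else
    match PySem.Str.splitMax? id_range "-" 1 with
    | some [start_str, end_str] =>
      if (PySem.Str.len start_str > 1 ∧ PySem.Str.startswith start_str "0" = true) ∨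
         (PySem.Str.len end_str > 1 ∧ PySem.Str.startswith end_str "0" = true) then d
      else
        match PySem.Int.ofStr? start_str with
        | none => d                      -- ValueError: continue
        | some start =>
          match PySem.Int.ofStr? end_str with
          | none => d                    -- ValueError: continue
          | some stop =>
            if start > stop then d
            else d.insert id_range (pvInvalidsB start stop)
    | _ => d  -- unreachable: '-' present gives exactly two parts

def find_invalid_ids_part2_alt (id_ranges : List String) : List (String × List Int) :=
  (id_ranges.foldl pvStepB PySem.Dict.empty).items

-- ===== PRECONDITION & SPEC =====
def Spec_find_invalid_ids_part2 (id_ranges : List String) (out : List (String × List Int)) : Prop := out = find_invalid_ids_part2_alt id_ranges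
instance (id_ranges : List String) (out : List (String × List Int)) : Decidable (Spec_find_invalid_ids_part2 id_ranges out) := by unfold Spec_find_invalid_ids_part2; infer_instance

-- ===== CLAIM (what is proved, stated in full; the proofs are below) =====
def Claim_equal_find_invalid_ids_part2 : Prop := ∀ (id_ranges : List String), Dom_find_invalid_ids_part2 id_ranges → Spec_find_invalid_ids_part2 id_ranges (find_invalid_ids_part2 id_ranges)

-- ===== LEMMAS AND PROOFS =====

def pvVal (cs : List Char) : Nat := cs.foldl (fun a c => 10 * a + (c.toNat - 48)) 0

theorem pvVal_append (t : List Char) (c : Char) :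
    pvVal (t ++ [c]) = 10 * pvVal t + (c.toNat - 48) := by
  simp [pvVal, List.foldl_append]

theorem pvDigBounds (c : Char) (h : c.isDigit = true) : 48 ≤ c.toNat ∧ c.toNat ≤ 57 := by
  simp only [Char.isDigit, Bool.and_eq_true, decide_eq_true_eq, ge_iff_le] at h
  obtain ⟨h1, h2⟩ := h
  rw [UInt32.le_iff_toNat_le] at h1 h2
  exact ⟨h1, h2⟩

theorem pvDigit_lt (c : Char) (h : c.isDigit = true) : c.toNat - 48 < 10 := by
  have := pvDigBounds c h; omega

theorem pvDigitChar_eq (c : Char) (h : c.isDigit = true) : Nat.digitChar (c.toNat - 48) = c := by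
  obtain ⟨h1, h2⟩ := pvDigBounds c h
  have hc : Char.ofNat c.toNat = c := Char.ofNat_toNat c
  set t := c.toNat with ht
  interval_cases t <;> rw [← hc] <;> rfl

theorem pvDigitCharVal (d : Nat) (h : d < 10) : (Nat.digitChar d).toNat - 48 = d := by
  interval_cases d <;> rfl

theorem pvVal_dig (n : Nat) : pvVal (Nat.toDigits 10 n) = n := by
  induction n using Nat.strong_induction_on with
  | _ n ih =>
    by_cases h : n < 10
    · rw [Nat.toDigits_of_lt_base h]
      show pvVal ([] ++ [n.digitChar]) = n
      rw [pvVal_append, pvDigitCharVal n h]; simp [pvVal]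
    · rw [Nat.toDigits_of_base_le (by norm_num) (by omega), pvVal_append,
        ih (n / 10) (by omega), pvDigitCharVal (n % 10) (by omega)]
      omega

theorem pvDig_inj {a b : Nat} (h : Nat.toDigits 10 a = Nat.toDigits 10 b) : a = b := by
  have := congrArg pvVal h
  rwa [pvVal_dig, pvVal_dig] at this

theorem pvDig_len_le_iff (n k : Nat) (hk : 0 < k) :
    (Nat.toDigits 10 n).length ≤ k ↔ n < 10 ^ k :=
  Nat.length_toDigits_le_iff (by norm_num) hk

theorem pvDig_lt (n : Nat) : n < 10 ^ (Nat.toDigits 10 n).length :=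
  (pvDig_len_le_iff n _ Nat.length_toDigits_pos).mp le_rfl

theorem pvDig_ge (n : Nat) (h : 1 ≤ n) : 10 ^ ((Nat.toDigits 10 n).length - 1) ≤ n := by
  rcases Nat.eq_or_lt_of_le (Nat.length_toDigits_pos (b := 10) (n := n)) with hL | hL
  · rw [← hL]; simpa using h
  · by_contra hc
    have := (pvDig_len_le_iff n ((Nat.toDigits 10 n).length - 1) (by omega)).mpr (by omega)
    omega

theorem pvDig_digit {n : Nat} {c : Char} (h : c ∈ Nat.toDigits 10 n) : c.isDigit = true :=
  Nat.isDigit_of_mem_toDigits (by norm_num) (by norm_num) h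

theorem pvVal_lt (t : List Char) (h : ∀ c ∈ t, c.isDigit = true) : pvVal t < 10 ^ t.length := by
  induction t using List.reverseRecOn with
  | nil => simp [pvVal]
  | append_singleton t c ih =>
    rw [pvVal_append]
    have hd := pvDigit_lt c (h c (by simp))
    have ht := ih (fun c hc => h c (by simp [hc]))
    rw [List.length_append, List.length_singleton, pow_succ]
    omega

theorem pvVal_cons_zero (rest : List Char) : pvVal ('0' :: rest) = pvVal rest := by
  simp [pvVal, List.foldl_cons]

theorem pvDig_head_ne (n : Nat) (h : 1 ≤ n) : (Nat.toDigits 10 n).head? ≠ some '0' := by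
  intro hh
  obtain ⟨rest, hrest⟩ : ∃ rest, Nat.toDigits 10 n = '0' :: rest := by
    cases hD : Nat.toDigits 10 n with
    | nil => simp [hD] at hh
    | cons a l => rw [hD] at hh; simp at hh; exact ⟨l, by rw [hh]⟩
  have hv : n = pvVal rest := by
    have := pvVal_dig n; rw [hrest, pvVal_cons_zero] at this; omega
  have hlt : pvVal rest < 10 ^ rest.length :=
    pvVal_lt rest (fun c hc => pvDig_digit (n := n) (by rw [hrest]; simp [hc]))
  have hge := pvDig_ge n h
  rw [hrest] at hge
  simp at hge
  omega

theorem pvRoundtrip (t : List Char) (h1 : t ≠ []) (h2 : ∀ c ∈ t, c.isDigit = true)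
    (h3 : t.head? ≠ some '0') : Nat.toDigits 10 (pvVal t) = t := by
  induction t using List.reverseRecOn with
  | nil => exact absurd rfl h1
  | append_singleton t c ih =>
    rcases List.eq_nil_or_concat t with rfl | hconcat
    · have hd := pvDigit_lt c (h2 c (by simp))
      have : pvVal ([] ++ [c]) = c.toNat - 48 := by rw [pvVal_append]; simp [pvVal]
      rw [this, Nat.toDigits_of_lt_base hd, pvDigitChar_eq c (h2 c (by simp))]
      simp
    · have htne : t ≠ [] := by rintro rfl; obtain ⟨L, b, hL⟩ := hconcat; simp at hL
      have hhead : t.head? ≠ some '0' := by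
        rwa [List.head?_append_of_ne_nil _ htne] at h3
      have ihh := ih htne (fun c hc => h2 c (by simp [hc])) hhead
      have hpos : 0 < pvVal t := by
        rcases Nat.eq_zero_or_pos (pvVal t) with hz | hp
        · exfalso
          rw [hz] at ihh
          have : Nat.toDigits 10 0 = ['0'] := rfl
          rw [this] at ihh
          exact hhead (by rw [← ihh]; rfl)
        · exact hp
      have hd := pvDigit_lt c (h2 c (by simp))
      rw [pvVal_append, ← Nat.toDigits_append_toDigits (by norm_num) hpos (by omega), ihh,
        Nat.toDigits_of_lt_base (by omega), pvDigitChar_eq c (h2 c (by simp))]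


theorem pvDig_concat (b m x : Nat) (hb : 1 ≤ b) (hm1 : 10 ^ (b - 1) ≤ m) (hm2 : m < 10 ^ b)
    (hx : 0 < x) : Nat.toDigits 10 (x * 10 ^ b + m) = Nat.toDigits 10 x ++ Nat.toDigits 10 m := by
  induction b generalizing m x with
  | zero => omega
  | succ b ih =>
    rcases Nat.eq_zero_or_pos b with rfl | hbpos
    · have hm10 : m < 10 := by simpa using hm2
      have := Nat.toDigits_append_toDigits (b := 10) (n := x) (d := m) (by norm_num) hx hm10
      rw [show x * 10 ^ (0 + 1) + m = 10 * x + m by ring, ← this]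
    · have hmge : 10 ^ b ≤ m := by simpa using hm1
      have hdiv1 : 10 ^ (b - 1) ≤ m / 10 := by
        rw [Nat.le_div_iff_mul_le (by norm_num)]
        calc 10 ^ (b - 1) * 10 = 10 ^ b := by rw [← pow_succ]; congr 1; omega
        _ ≤ m := hmge
      have hdiv2 : m / 10 < 10 ^ b := by
        rw [Nat.div_lt_iff_lt_mul (by norm_num), ← pow_succ]; exact hm2
      have hX : 0 < x * 10 ^ b + m / 10 := by positivity
      have key := Nat.toDigits_append_toDigits (b := 10) (n := x * 10 ^ b + m / 10)
        (d := m % 10) (by norm_num) hX (Nat.mod_lt m (y := 10) (by norm_num))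
      have harith : 10 * (x * 10 ^ b + m / 10) + m % 10 = x * 10 ^ (b + 1) + m := by
        have := Nat.div_add_mod m 10; ring_nf; omega
      rw [harith] at key
      rw [← key, ih (m / 10) x hbpos hdiv1 hdiv2 hx, List.append_assoc]
      congr 1
      have hm10 : 10 ≤ m := by
        have : (10:Nat) ^ 1 ≤ 10 ^ b := Nat.pow_le_pow_right (by norm_num) (by omega)
        simp at this; omega
      rw [Nat.toDigits_of_base_le (by norm_num) hm10]
      congr 1
      exact Nat.toDigits_of_lt_base (Nat.mod_lt m (y := 10) (by norm_num))


theorem pvDig_len_eq (b m : Nat) (hb : 1 ≤ b) (hm1 : 10 ^ (b - 1) ≤ m) (hm2 : m < 10 ^ b) :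
    (Nat.toDigits 10 m).length = b := by
  have hle : (Nat.toDigits 10 m).length ≤ b := (pvDig_len_le_iff m b (by omega)).mpr hm2
  rcases Nat.eq_or_lt_of_le hb with rfl | hb2
  · have := Nat.length_toDigits_pos (b := 10) (n := m); omega
  · by_contra hne
    have hlt : (Nat.toDigits 10 m).length ≤ b - 1 := by omega
    have := (pvDig_len_le_iff m (b - 1) (by omega)).mp ?_
    · omega
    · exact hlt
  
theorem pvDig_mono {a b : Nat} (h : a ≤ b) :
    (Nat.toDigits 10 a).length ≤ (Nat.toDigits 10 b).length := by
  apply (pvDig_len_le_iff a _ Nat.length_toDigits_pos).mpr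
  exact lt_of_le_of_lt h (pvDig_lt b)

def pvRepN (m b k : Nat) : Nat := (List.range k).foldl (fun a _ => a * 10 ^ b + m) 0

theorem pvRepN_succ (m b k : Nat) : pvRepN m b (k + 1) = pvRepN m b k * 10 ^ b + m := by
  simp [pvRepN, List.range_succ]

theorem pvRepN_one (m b : Nat) : pvRepN m b 1 = m := by simp [pvRepN]

theorem pvRepN_pos (m b k : Nat) (hm : 1 ≤ m) (hk : 1 ≤ k) : 1 ≤ pvRepN m b k := by
  induction k with
  | zero => omega
  | succ k _ => rw [pvRepN_succ]; omega

theorem pvRepN_dig (m b k : Nat) (hb : 1 ≤ b) (hm1 : 10 ^ (b - 1) ≤ m) (hm2 : m < 10 ^ b)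
    (hk : 1 ≤ k) :
    Nat.toDigits 10 (pvRepN m b k) = (List.replicate k (Nat.toDigits 10 m)).flatten := by
  induction k with
  | zero => omega
  | succ k ih =>
    rcases Nat.eq_zero_or_pos k with rfl | hkpos
    · simp [pvRepN_one]
    · have hm0 : 1 ≤ m := le_trans (Nat.one_le_pow _ _ (by norm_num)) hm1
      rw [pvRepN_succ, pvDig_concat b m (pvRepN m b k) hb hm1 hm2 (pvRepN_pos m b k hm0 hkpos),
        ih hkpos, List.replicate_succ', List.flatten_append]
      simp

theorem pvRepN_int (m b k : Nat) :
    (List.range k).foldl (fun (a : Int) _ => a * (10:Int) ^ b + (m : Int)) 0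
      = ((pvRepN m b k : Nat) : Int) := by
  induction k with
  | zero => simp [pvRepN]
  | succ k ih => rw [List.range_succ, List.foldl_append, pvRepN_succ]; push_cast; rw [ih]; simp [List.foldl]

theorem pvRepN_len (m b k : Nat) (hb : 1 ≤ b) (hm1 : 10 ^ (b - 1) ≤ m) (hm2 : m < 10 ^ b)
    (hk : 1 ≤ k) : (Nat.toDigits 10 (pvRepN m b k)).length = b * k := by
  rw [pvRepN_dig m b k hb hm1 hm2 hk]
  rw [List.length_flatten, List.map_replicate, List.sum_replicate, smul_eq_mul,
    pvDig_len_eq b m hb hm1 hm2]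
  ring

theorem pvIsRep_iff (s : List Char) :
    is_repeated_block s = true ↔
      ∃ bN kN : Nat, 1 ≤ bN ∧ 2 ≤ kN ∧ s.length = bN * kN ∧
        s = (List.replicate kN (s.take bN)).flatten := by
  dsimp only [is_repeated_block]
  have hfd : PySem.Int.floordiv (s.length : Int) 2 = ((s.length / 2 : Nat) : Int) := by
    exact_mod_cast PySem.Int.floordiv_natCast s.length 2
  split
  · rename_i hlt
    simp only [Bool.false_eq_true, false_iff]
    rintro ⟨bN, kN, h1, h2, h3, -⟩
    have : (2:Nat) ≤ s.length := by calc (2:Nat) ≤ 1 * 2 := by omega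
                                        _ ≤ bN * kN := Nat.mul_le_mul h1 h2
                                        _ = s.length := h3.symm
    omega
  · rename_i hge
    have hL2 : 2 ≤ s.length := by exact_mod_cast not_lt.mp hge
    rw [List.any_eq_true]
    constructor
    · rintro ⟨a, hamem, hp⟩
      rw [PySem.List.mem_pyRange_one] at hamem
      obtain ⟨ha1, ha2⟩ := hamem
      set bN := a.toNat with hbN
      have haN : a = (bN : Int) := by omega
      rw [Bool.and_eq_true, beq_iff_eq, beq_iff_eq] at hp
      obtain ⟨hmod, hrep⟩ := hp
      rw [haN] at hmod hrep ha2
      have hmodN : s.length % bN = 0 := by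
        rw [show ((0:Int) = ((0:Nat) : Int)) from rfl] at hmod
        rw [PySem.Int.mod_natCast] at hmod
        exact_mod_cast hmod
      have hble : bN ≤ s.length / 2 := by
        rw [hfd] at ha2; omega
      have hb2 : bN * 2 ≤ s.length := (Nat.le_div_iff_mul_le (by norm_num)).mp hble
      have hdvd : bN ∣ s.length := Nat.dvd_of_mod_eq_zero hmodN
      refine ⟨bN, s.length / bN, by omega, ?_, ?_, ?_⟩
      · have hlen' : bN * (s.length / bN) = s.length := Nat.mul_div_cancel' hdvd
        have : bN * 2 ≤ bN * (s.length / bN) := by omega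
        exact Nat.le_of_mul_le_mul_left this (by omega)
      · exact (Nat.mul_div_cancel' hdvd).symm
      · rw [PySem.List.slice_to_natCast, PySem.Int.floordiv_natCast] at hrep
        unfold pvStrMul at hrep
        simpa using hrep
    · rintro ⟨bN, kN, hb1, hk2, hlen, hrep⟩
      refine ⟨(bN : Int), ?_, ?_⟩
      · rw [PySem.List.mem_pyRange_one, hfd]
        have : bN ≤ s.length / 2 := by
          rw [Nat.le_div_iff_mul_le (by norm_num), hlen]
          exact Nat.mul_le_mul_left bN hk2
        omega
      · rw [Bool.and_eq_true, beq_iff_eq, beq_iff_eq]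
        constructor
        · rw [show ((0:Int) = ((0:Nat) : Int)) from rfl, PySem.Int.mod_natCast]
          norm_cast
          rw [hlen]
          exact Nat.mul_mod_right bN kN
        · rw [PySem.List.slice_to_natCast, PySem.Int.floordiv_natCast]
          unfold pvStrMul
          have : s.length / bN = kN := by rw [hlen, Nat.mul_div_cancel_left kN (by omega)]
          rw [this]
          simpa using hrep

theorem pvIsRep_dig_iff (n : Nat) :
    is_repeated_block (Nat.toDigits 10 n) = true ↔
      ∃ m b k : Nat, 1 ≤ b ∧ 2 ≤ k ∧ 10 ^ (b - 1) ≤ m ∧ m < 10 ^ b ∧ n = pvRepN m b k := by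
  rw [pvIsRep_iff]
  constructor
  · rintro ⟨bN, kN, hb1, hk2, hlen, hrep⟩
    set s := Nat.toDigits 10 n with hs
    set t := s.take bN with ht
    have hbL : bN ≤ s.length := by calc bN = bN * 1 := by omega
                                        _ ≤ bN * kN := Nat.mul_le_mul_left bN (by omega)
                                        _ = s.length := hlen.symm
    have htlen : t.length = bN := by rw [ht, List.length_take]; omega
    have hn1 : 1 ≤ n := by
      have h2L : 2 ≤ s.length := by nlinarith
      by_contra h0
      have : n = 0 := by omega
      rw [this] at hs
      have : s = ['0'] := hs ▸ rfl
      rw [this] at h2L; simp at h2L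
    have htne : t ≠ [] := by
      intro h0; rw [h0] at htlen; simp at htlen; omega
    have hthead : t.head? = s.head? := by
      rw [ht]; cases s with
      | nil => simp
      | cons c s' => cases bN with
        | zero => omega
        | succ j => simp [List.take]
    have hhead : t.head? ≠ some '0' := by rw [hthead]; exact pvDig_head_ne n hn1
    have hdigs : ∀ c ∈ t, c.isDigit = true := fun c hc =>
      pvDig_digit (n := n) (List.mem_of_mem_take hc)
    have hroundtrip := pvRoundtrip t htne hdigs hhead
    set m := pvVal t with hm
    have hm1 : 1 ≤ m := by
      by_contra h0
      have : m = 0 := by omega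
      rw [this] at hroundtrip
      have : t = ['0'] := by rw [← hroundtrip]; rfl
      rw [this] at hhead; simp at hhead
    have hmlen : (Nat.toDigits 10 m).length = bN := by rw [hroundtrip]; exact htlen
    have hmub : m < 10 ^ bN := by rw [← hmlen]; exact pvDig_lt m
    have hmlb : 10 ^ (bN - 1) ≤ m := by rw [← hmlen]; exact pvDig_ge m hm1
    refine ⟨m, bN, kN, hb1, hk2, hmlb, hmub, ?_⟩
    apply pvDig_inj (b := pvRepN m bN kN)
    rw [pvRepN_dig m bN kN hb1 hmlb hmub (by omega), ← hs, hroundtrip]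
    exact hrep
  · rintro ⟨m, b, k, hb1, hk2, hmlb, hmub, hn⟩
    have hdig := pvRepN_dig m b k hb1 hmlb hmub (by omega)
    have hmlen := pvDig_len_eq b m hb1 hmlb hmub
    have hlen : (Nat.toDigits 10 n).length = b * k := by
      rw [hn]; exact pvRepN_len m b k hb1 hmlb hmub (by omega)
    refine ⟨b, k, hb1, hk2, hlen, ?_⟩
    have htake : (Nat.toDigits 10 n).take b = Nat.toDigits 10 m := by
      rw [hn, hdig]
      cases k with
      | zero => omega
      | succ j =>
        rw [List.replicate_succ, List.flatten_cons, ← hmlen, List.take_left]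
    rw [htake, hn, hdig]

theorem pvIsRep_neg (x : Int) (h : x < 0) : is_repeated_block (PySem.Int.toChars x) = false := by
  have hch : PySem.Int.toChars x = '-' :: Nat.toDigits 10 x.natAbs := by
    simp [PySem.Int.toChars, h]
  by_contra hc
  rw [Bool.not_eq_false, pvIsRep_iff] at hc
  obtain ⟨bN, kN, hb1, hk2, hlen, hrep⟩ := hc
  set s := PySem.Int.toChars x with hs
  have hcount1 : s.count '-' = 1 := by
    rw [hch, List.count_cons_self]
    have : (Nat.toDigits 10 x.natAbs).count '-' = 0 := by
      rw [List.count_eq_zero]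
      intro hmem
      have := pvDig_digit hmem
      simp [Char.isDigit] at this
    omega
  have hmemt : '-' ∈ s.take bN := by
    rw [hch]
    cases bN with
    | zero => omega
    | succ j => simp [List.take]
  have hcountt : 1 ≤ (s.take bN).count '-' := List.count_pos_iff.mpr hmemt
  have : s.count '-' = kN * (s.take bN).count '-' := by
    conv_lhs => rw [hrep]
    rw [List.count_flatten, List.map_replicate, List.sum_replicate, smul_eq_mul]
  nlinarith

def pvGen (digitsE : Nat) (x : Int) : Prop :=
  ∃ total bl m : Nat, 2 ≤ total ∧ total ≤ digitsE ∧ 1 ≤ bl ∧ bl ≤ total / 2 ∧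
    total % bl = 0 ∧ 10 ^ (bl - 1) ≤ m ∧ m < 10 ^ bl ∧ x = ((pvRepN m bl (total / bl) : Nat) : Int)

theorem pvGen_pos {dE : Nat} {x : Int} (h : pvGen dE x) : 1 ≤ x := by
  obtain ⟨total, bl, m, h2t, htd, hb1, hb2, hmod, hm1, hm2, hx⟩ := h
  have hm : 1 ≤ m := le_trans (Nat.one_le_pow _ _ (by norm_num)) hm1
  have hbt : bl * 2 ≤ total := (Nat.le_div_iff_mul_le (by norm_num)).mp hb2
  have hk : 1 ≤ total / bl := Nat.div_pos (by omega) (by omega)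
  have := pvRepN_pos m bl (total / bl) hm hk
  omega

theorem pvP_iff_gen (x e : Int) (hx : 0 ≤ x) (hxe : x ≤ e) :
    is_repeated_block (PySem.Int.toChars x) = true ↔ pvGen ((PySem.Int.toChars e).length) x := by
  have he : 0 ≤ e := le_trans hx hxe
  have hcx : PySem.Int.toChars x = Nat.toDigits 10 x.toNat := by
    simp [PySem.Int.toChars, not_lt.mpr hx]
  have hce : PySem.Int.toChars e = Nat.toDigits 10 e.toNat := by
    simp [PySem.Int.toChars, not_lt.mpr he]
  rw [hcx, hce, pvIsRep_dig_iff]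
  constructor
  · rintro ⟨m, b, k, hb1, hk2, hm1, hm2, hn⟩
    refine ⟨b * k, b, m, by nlinarith, ?_, hb1, ?_, ?_, hm1, hm2, ?_⟩
    · have h1 : (Nat.toDigits 10 x.toNat).length = b * k := by
        rw [hn]; exact pvRepN_len m b k hb1 hm1 hm2 (by omega)
      have h2 : x.toNat ≤ e.toNat := Int.toNat_le_toNat hxe
      rw [← h1]
      exact pvDig_mono h2
    · rw [Nat.le_div_iff_mul_le (by norm_num)]
      exact Nat.mul_le_mul_left b hk2
    · exact Nat.mul_mod_right b k
    · rw [Nat.mul_div_cancel_left k (by omega)]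
      omega
  · rintro ⟨total, bl, m, h2t, htd, hb1, hb2, hmod, hm1, hm2, hxeq⟩
    have hdvd : bl ∣ total := Nat.dvd_of_mod_eq_zero hmod
    have hbt : bl * 2 ≤ total := (Nat.le_div_iff_mul_le (by norm_num)).mp hb2
    have hlen' : bl * (total / bl) = total := Nat.mul_div_cancel' hdvd
    have hk2 : 2 ≤ total / bl := by
      have : bl * 2 ≤ bl * (total / bl) := by omega
      exact Nat.le_of_mul_le_mul_left this (by omega)
    refine ⟨m, bl, total / bl, hb1, hk2, hm1, hm2, ?_⟩
    omega

theorem pvGuard_false (num : Int) :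
    ¬ (((PySem.Int.toChars num).length : Int) > 1 ∧
       PySem.Chars.startswith (PySem.Int.toChars num) ['0'] = true) := by
  rintro ⟨hlen, hsw⟩
  rw [PySem.Chars.startswith_iff] at hsw
  obtain ⟨t, ht⟩ := hsw
  rcases lt_or_ge num 0 with hneg | hpos
  · have : PySem.Int.toChars num = '-' :: Nat.toDigits 10 num.natAbs := by
      simp [PySem.Int.toChars, hneg]
    rw [this] at ht
    simp at ht
  · have hc : PySem.Int.toChars num = Nat.toDigits 10 num.toNat := by
      simp [PySem.Int.toChars, not_lt.mpr hpos]
    rcases Nat.eq_zero_or_pos num.toNat with h0 | h1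
    · rw [hc, h0] at hlen
      have : Nat.toDigits 10 0 = ['0'] := rfl
      rw [this] at hlen
      simp at hlen
    · apply pvDig_head_ne num.toNat h1
      rw [← hc, ← ht]
      simp

theorem pvInvalidsA_eq_filter (start stop : Int) :
    pvInvalidsA start stop = (PySem.List.pyRange start (stop + 1) 1).filter
      (fun num => is_repeated_block (PySem.Int.toChars num)) := by
  unfold pvInvalidsA
  have hbody : (fun (acc : List Int) (num : Int) =>
      let s := PySem.Int.toChars num
      if (s.length : Int) > 1 ∧ PySem.Chars.startswith s ['0'] = true then acc
      else if is_repeated_block s then acc ++ [num] else acc)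
      = fun acc num => if (fun n => is_repeated_block (PySem.Int.toChars n)) num = true
          then acc ++ [(fun (n : Int) => n) num] else acc := by
    funext acc num
    simp only [if_neg (pvGuard_false num)]
  rw [hbody, PySem.List.foldl_append_if]
  simp

theorem pvMem_foldl_set {α : Type} (l : List α) (g : PySem.Set Int → α → PySem.Set Int)
    (Q : α → Int → Prop) (h : ∀ s a x, x ∈ g s a ↔ x ∈ s ∨ Q a x) :
    ∀ (s0 : PySem.Set Int) (x : Int), x ∈ l.foldl g s0 ↔ x ∈ s0 ∨ ∃ a ∈ l, Q a x := by
  induction l with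
  | nil => intro s0 x; simp
  | cons a l ih =>
    intro s0 x
    rw [List.foldl_cons, ih, h]
    simp only [List.mem_cons]
    constructor
    · rintro ((hx | hq) | ⟨b, hb, hq⟩)
      · exact Or.inl hx
      · exact Or.inr ⟨a, Or.inl rfl, hq⟩
      · exact Or.inr ⟨b, Or.inr hb, hq⟩
    · rintro (hx | ⟨b, (rfl | hb), hq⟩)
      · exact Or.inl (Or.inl hx)
      · exact Or.inl (Or.inr hq)
      · exact Or.inr ⟨b, hb, hq⟩

theorem pvNodup_foldl_set {α : Type} (l : List α) (g : PySem.Set Int → α → PySem.Set Int)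
    (h : ∀ s a, List.Nodup s → List.Nodup (g s a)) :
    ∀ (s0 : PySem.Set Int), List.Nodup s0 → List.Nodup (l.foldl g s0) := by
  induction l with
  | nil => intro s0 hs; simpa using hs
  | cons a l ih => intro s0 hs; rw [List.foldl_cons]; exact ih _ (h s0 a hs)

-- the Int-level number B builds for (total, block_len, block)
def pvNumI (total block_len block : Int) : Int :=
  (List.range (PySem.Int.floordiv total block_len).toNat).foldl
    (fun num _ => num * (10:Int) ^ block_len.toNat + block) 0

theorem pvNumI_cast (tN blN mN : Nat) :
    pvNumI (tN : Int) (blN : Int) (mN : Int) = ((pvRepN mN blN (tN / blN) : Nat) : Int) := by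
  unfold pvNumI
  rw [PySem.Int.floordiv_natCast]
  simp only [Int.toNat_natCast]
  exact pvRepN_int mN blN (tN / blN)

theorem pvFound_spec (start stop x : Int) :
    x ∈ ((PySem.List.pyRange 2 (((PySem.Int.toChars stop).length : Int) + 1) 1).foldl
      (fun fnd total =>
        (PySem.List.pyRange 1 (PySem.Int.floordiv total 2 + 1) 1).foldl (fun fnd block_len =>
          if PySem.Int.mod total block_len ≠ 0 then fnd
          else
            let reps := PySem.Int.floordiv total block_len
            (PySem.List.pyRange ((10:Int) ^ (block_len - 1).toNat) ((10:Int) ^ block_len.toNat) 1).foldl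
              (fun fnd block =>
                let num := (List.range reps.toNat).foldl
                  (fun num _ => num * (10:Int) ^ block_len.toNat + block) 0
                if start ≤ num ∧ num ≤ stop then fnd.add num else fnd) fnd) fnd)
      (PySem.Set.empty : PySem.Set Int))
    ↔ pvGen ((PySem.Int.toChars stop).length) x ∧ start ≤ x ∧ x ≤ stop := by
  have hin : ∀ (total block_len : Int) (s : PySem.Set Int) (a x : Int),
      x ∈ (fun fnd block =>
        let num := (List.range (PySem.Int.floordiv total block_len).toNat).foldl
          (fun num _ => num * (10:Int) ^ block_len.toNat + block) 0
        if start ≤ num ∧ num ≤ stop then fnd.add num else fnd) s a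
      ↔ x ∈ s ∨ ((start ≤ pvNumI total block_len a ∧ pvNumI total block_len a ≤ stop) ∧
          x = pvNumI total block_len a) := by
    intro total block_len s a x
    dsimp only
    rw [show (List.range (PySem.Int.floordiv total block_len).toNat).foldl
          (fun num _ => num * (10:Int) ^ block_len.toNat + a) 0 = pvNumI total block_len a from rfl]
    split
    · rename_i hc
      rw [PySem.Set.mem_add]
      tauto
    · rename_i hc
      tauto
  have hmid : ∀ (total : Int) (s : PySem.Set Int) (bl x : Int),
      x ∈ (fun fnd block_len =>
          if PySem.Int.mod total block_len ≠ 0 then fnd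
          else
            let reps := PySem.Int.floordiv total block_len
            (PySem.List.pyRange ((10:Int) ^ (block_len - 1).toNat) ((10:Int) ^ block_len.toNat) 1).foldl
              (fun fnd block =>
                let num := (List.range reps.toNat).foldl
                  (fun num _ => num * (10:Int) ^ block_len.toNat + block) 0
                if start ≤ num ∧ num ≤ stop then fnd.add num else fnd) fnd) s bl
      ↔ x ∈ s ∨ (PySem.Int.mod total bl = 0 ∧
          ∃ block ∈ PySem.List.pyRange ((10:Int) ^ (bl - 1).toNat) ((10:Int) ^ bl.toNat) 1,
            (start ≤ pvNumI total bl block ∧ pvNumI total bl block ≤ stop) ∧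
              x = pvNumI total bl block) := by
    intro total s bl x
    dsimp only
    split
    · rename_i hc
      simp only [ne_eq] at hc
      tauto
    · rename_i hc
      simp only [ne_eq, not_not] at hc
      rw [pvMem_foldl_set _ _ _ (hin total bl)]
      tauto
  rw [pvMem_foldl_set _ _
    (fun total x => ∃ bl ∈ PySem.List.pyRange 1 (PySem.Int.floordiv total 2 + 1) 1,
      PySem.Int.mod total bl = 0 ∧
        ∃ block ∈ PySem.List.pyRange ((10:Int) ^ (bl - 1).toNat) ((10:Int) ^ bl.toNat) 1,
          (start ≤ pvNumI total bl block ∧ pvNumI total bl block ≤ stop) ∧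
            x = pvNumI total bl block)
    (fun s total x => pvMem_foldl_set _ _ _ (fun s bl x => hmid total s bl x) s x)]
  have hempty : ∀ y : Int, y ∈ (PySem.Set.empty : PySem.Set Int) ↔ False := by
    intro y; simp [PySem.Set.empty]
  rw [hempty, false_or]
  set dE := (PySem.Int.toChars stop).length with hdE
  constructor
  · rintro ⟨total, htmem, bl, hblmem, hmod, block, hbkmem, ⟨hxs, hxe⟩, hxeq⟩
    rw [PySem.List.mem_pyRange_one] at htmem hblmem hbkmem
    have ht2 : 2 ≤ total := htmem.1
    have hbl1 : 1 ≤ bl := hblmem.1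
    set tN := total.toNat with htN
    set blN := bl.toNat with hblN
    have htcast : total = (tN : Int) := by omega
    have hblcast : bl = (blN : Int) := by omega
    have hbk1 : (1:Int) ≤ block := by
      have := hbkmem.1
      have h10 : (1:Int) ≤ (10:Int) ^ ((bl - 1).toNat) := one_le_pow₀ (by norm_num)
      omega
    set mN := block.toNat with hmN
    have hbkcast : block = (mN : Int) := by omega
    have hfd2 : PySem.Int.floordiv total 2 = ((tN / 2 : Nat) : Int) := by
      rw [htcast]; exact_mod_cast PySem.Int.floordiv_natCast tN 2
    have hble : blN ≤ tN / 2 := by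
      have := hblmem.2; rw [hfd2] at this; omega
    have hmodN : tN % blN = 0 := by
      rw [htcast, hblcast, PySem.Int.mod_natCast] at hmod
      exact_mod_cast hmod
    have he1 : ((bl : Int) - 1).toNat = blN - 1 := by omega
    have he2 : (bl : Int).toNat = blN := by omega
    have hmlb : 10 ^ (blN - 1) ≤ mN := by
      have := hbkmem.1
      rw [he1] at this
      have hc : ((10:Nat) ^ (blN - 1) : Int) ≤ (mN : Int) := by push_cast; omega
      exact_mod_cast hc
    have hmub : mN < 10 ^ blN := by
      have := hbkmem.2
      have hc : ((mN : Nat) : Int) < ((10:Nat) ^ blN : Int) := by push_cast; omega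
      exact_mod_cast hc
    have hnum : pvNumI total bl block = ((pvRepN mN blN (tN / blN) : Nat) : Int) := by
      rw [htcast, hblcast, hbkcast]
      exact pvNumI_cast tN blN mN
    have htd : tN ≤ dE := by
      have := htmem.2; omega
    refine ⟨⟨tN, blN, mN, by omega, htd, by omega, hble, hmodN, hmlb, hmub, ?_⟩, ?_, ?_⟩
    · rw [hxeq, hnum]
    · rw [hxeq] at *; omega
    · rw [hxeq] at *; omega
  · rintro ⟨⟨tN, blN, mN, ht2, htd, hbl1, hble, hmodN, hmlb, hmub, hxeq⟩, hxs, hxe⟩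
    refine ⟨(tN : Int), ?_, (blN : Int), ?_, ?_, (mN : Int), ?_, ?_, ?_⟩
    · rw [PySem.List.mem_pyRange_one]
      constructor
      · exact_mod_cast ht2
      · have : (tN : Int) ≤ (dE : Int) := by exact_mod_cast htd
        omega
    · rw [PySem.List.mem_pyRange_one]
      have hfd2 : PySem.Int.floordiv (tN : Int) 2 = ((tN / 2 : Nat) : Int) := by
        exact_mod_cast PySem.Int.floordiv_natCast tN 2
      rw [hfd2]
      constructor
      · exact_mod_cast hbl1
      · have : (blN : Int) ≤ ((tN / 2 : Nat) : Int) := by exact_mod_cast hble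
        omega
    · rw [PySem.Int.mod_natCast]
      exact_mod_cast hmodN
    · rw [PySem.List.mem_pyRange_one]
      have he1 : (((blN : Nat) : Int) - 1).toNat = blN - 1 := by omega
      have he2 : ((blN : Nat) : Int).toNat = blN := by omega
      rw [he1, he2]
      constructor
      · have : ((10 ^ (blN - 1) : Nat) : Int) ≤ ((mN : Nat) : Int) := by exact_mod_cast hmlb
        push_cast at this ⊢
        omega
      · have : ((mN : Nat) : Int) < ((10 ^ blN : Nat) : Int) := by exact_mod_cast hmub
        push_cast at this ⊢
        omega
    · rw [pvNumI_cast tN blN mN, ← hxeq]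
      exact ⟨hxs, hxe⟩
    · rw [pvNumI_cast tN blN mN, ← hxeq]

theorem pvFound_nodup (start stop : Int) :
    List.Nodup ((PySem.List.pyRange 2 (((PySem.Int.toChars stop).length : Int) + 1) 1).foldl
      (fun (fnd : PySem.Set Int) total =>
        (PySem.List.pyRange 1 (PySem.Int.floordiv total 2 + 1) 1).foldl (fun (fnd : PySem.Set Int) block_len =>
          if PySem.Int.mod total block_len ≠ 0 then fnd
          else
            let reps := PySem.Int.floordiv total block_len
            (PySem.List.pyRange ((10:Int) ^ (block_len - 1).toNat) ((10:Int) ^ block_len.toNat) 1).foldl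
              (fun (fnd : PySem.Set Int) block =>
                let num := (List.range reps.toNat).foldl
                  (fun num _ => num * (10:Int) ^ block_len.toNat + block) 0
                if start ≤ num ∧ num ≤ stop then fnd.add num else fnd) fnd) fnd)
      (PySem.Set.empty : PySem.Set Int)) := by
  apply pvNodup_foldl_set
  · intro s total hs
    apply pvNodup_foldl_set
    · intro s bl hs
      dsimp only
      split
      · exact hs
      · apply pvNodup_foldl_set
        · intro s block hs
          dsimp only
          split
          · exact PySem.Set.nodup_add _ _ hs
          · exact hs
        · exact hs
    · exact hs
  · simp [PySem.Set.empty]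

theorem pvInvalidsB_eq (start stop : Int) :
    pvInvalidsB start stop = pvInvalidsA start stop := by
  rw [pvInvalidsA_eq_filter]
  dsimp only [pvInvalidsB]
  apply PySem.List.sorted_eq_of_perm_of_pairwise_lt
  · rw [List.perm_ext_iff_of_nodup
      (List.Nodup.filter _ (PySem.List.nodup_pyRange_one _ _)) (pvFound_nodup start stop)]
    intro a
    rw [List.mem_filter, PySem.List.mem_pyRange_one, pvFound_spec]
    constructor
    · rintro ⟨⟨ha1, ha2⟩, hrep⟩
      have ha0 : 0 ≤ a := by
        by_contra hneg
        rw [pvIsRep_neg a (by omega)] at hrep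
        simp at hrep
      have := (pvP_iff_gen a stop ha0 (by omega)).mp (by simpa using hrep)
      exact ⟨this, ha1, by omega⟩
    · rintro ⟨hgen, ha1, ha2⟩
      have ha0 : (0:Int) ≤ a := le_trans (by norm_num) (pvGen_pos hgen)
      refine ⟨⟨ha1, by omega⟩, ?_⟩
      simpa using (pvP_iff_gen a stop ha0 ha2).mpr hgen
  · exact List.Pairwise.filter _ (PySem.List.pairwise_lt_pyRange_one _ _)

theorem pvStep_eq : pvStepA = pvStepB := by
  funext d r
  unfold pvStepA pvStepB
  split
  · rfl
  · split
    · split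
      · rfl
      · split
        · rfl
        · split
          · rfl
          · split
            · rfl
            · rw [pvInvalidsB_eq]
    · rfl

-- ===== VERDICT (by name: the statement is the Claim_ definition above) =====
theorem find_invalid_ids_part2_spec : Claim_equal_find_invalid_ids_part2 := by
  intro id_ranges _
  unfold Spec_find_invalid_ids_part2 find_invalid_ids_part2 find_invalid_ids_part2_alt
  rw [pvStep_eq]
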